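-- pv_equiv track=rewrite | github.com/zimpha/competitive-programming | opencup/xix/gp-of-belarus/F.py | convert
-- ===== SOURCE A (Python) =====
-- def convert(a, b):
--     digits = {}
--     u, a = divmod(a, b)
--     for i in range(63):
--         digits[i] = u >> i & 1
--     for i in range(1, 400):
--         digits[-i], a = divmod(a * 2, b)
--     return digits
-- ===== SOURCE B (Python) =====
-- def convert(a, b):
--     # One big-integer division replaces the 399 per-bit divmods: the fractional
--     # bits of r/b are the binary digits of floor(r * 2^399 / b).
--     u, r = divmod(a, b)
--     frac = (r << 399) // b
--     return {i: u >> i & 1 for i in range(63)} | {-i: frac >> (399 - i) & 1 for i in range(1, 400)}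
-- ===== Notes on version B (the rewrite author's own statement) =====
-- stated objective: alternative
-- what changed: The 399-iteration divmod loop for the fractional bits is replaced by a single big-integer division frac = (a%b << 399) // b, after which each fractional digit is read off frac by a shift-and-mask, mirroring how the integer bits are read off the quotient; the dict is built by two comprehensions merged with |.
import Mathlib
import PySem

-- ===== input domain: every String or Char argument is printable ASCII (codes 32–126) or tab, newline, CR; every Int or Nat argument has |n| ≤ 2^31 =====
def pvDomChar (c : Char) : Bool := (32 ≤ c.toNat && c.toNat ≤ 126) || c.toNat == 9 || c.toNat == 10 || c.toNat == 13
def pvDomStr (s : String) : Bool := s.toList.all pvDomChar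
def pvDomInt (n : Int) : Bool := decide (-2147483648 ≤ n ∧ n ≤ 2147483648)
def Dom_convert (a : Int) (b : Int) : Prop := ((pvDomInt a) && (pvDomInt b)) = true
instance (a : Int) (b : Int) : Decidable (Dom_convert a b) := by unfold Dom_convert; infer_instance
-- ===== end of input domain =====

-- B replaces A's 399 per-bit divmods by ONE division of the scaled remainder, reading
-- the fractional bits off that quotient by shifts (objective: alternative).

-- ===== PORT A =====
-- literal transliteration of A: dict built by inserts; the second loop threads the
-- remainder state 'a' through a foldl; divmod(x, b) is (floordiv x b, mod x b) under b ≠ 0.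
def convert (a : Int) (b : Int) : List (Int × Int) :=
  let digits : PySem.Dict Int Int := PySem.Dict.empty
  let u := PySem.Int.floordiv a b
  let a1 := PySem.Int.mod a b
  let digits := (PySem.List.pyRange 0 63 1).foldl
      (fun d i => d.insert i (PySem.Int.band (u >>> i.toNat) 1)) digits
  let s := (PySem.List.pyRange 1 400 1).foldl
      (fun (s : PySem.Dict Int Int × Int) i =>
        (s.1.insert (-i) (PySem.Int.floordiv (s.2 * 2) b), PySem.Int.mod (s.2 * 2) b))
      (digits, a1)
  s.1.items

-- ===== PORT B =====
-- literal transliteration of Source B: u, r = divmod(a, b); frac = (r << 399) // b;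
-- two dict comprehensions over disjoint keys merged with '|' = list append of the items.
def convert_alt (a : Int) (b : Int) : List (Int × Int) :=
  let u := PySem.Int.floordiv a b
  let r := PySem.Int.mod a b
  let frac := PySem.Int.floordiv (r <<< (399 : Nat)) b
  ((PySem.List.pyRange 0 63 1).map (fun i => (i, PySem.Int.band (u >>> i.toNat) 1)))
    ++ ((PySem.List.pyRange 1 400 1).map
        (fun i => (-i, PySem.Int.band (frac >>> (399 - i).toNat) 1)))

-- ===== PRECONDITION & SPEC =====
-- Pre_ excludes exactly b = 0, where Python's divmod raises ZeroDivisionError.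
def Pre_convert (a : Int) (b : Int) : Prop := b ≠ 0
instance (a : Int) (b : Int) : Decidable (Pre_convert a b) := by unfold Pre_convert; infer_instance
def pvWitness_convert : Int × Int := (7, 3)

def Spec_convert (a : Int) (b : Int) (out : List (Int × Int)) : Prop := out = convert_alt a b
instance (a : Int) (b : Int) (out : List (Int × Int)) : Decidable (Spec_convert a b out) := by unfold Spec_convert; infer_instance

-- ===== CLAIM (what is proved, stated in full; the proofs are below) =====
def Claim_equal_convert : Prop := ∀ (a : Int) (b : Int), Dom_convert a b → Pre_convert a b → Spec_convert a b (convert a b)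

-- ===== LEMMAS AND PROOFS =====

-- nested floor division: dividing a floor quotient again by a positive m is one division
lemma fdiv_fdiv_pos (a b m : Int) (hm : 0 < m) : (a.fdiv b).fdiv m = a.fdiv (b * m) := by
  rcases le_or_gt 0 b with hb | hb
  · exact Int.fdiv_fdiv_eq_fdiv_mul a hb hm.le
  · have h1 : (-b) * m = -(b * m) := by ring
    rw [← Int.neg_fdiv_neg a b, Int.fdiv_fdiv_eq_fdiv_mul (-a) (by omega) hm.le, h1,
      Int.neg_fdiv_neg]

-- Python's x >> k is floor division by 2^k (the shifted divisor is nonnegative, so ediv = fdiv)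
lemma shiftRight_eq_fdiv (x : Int) (k : Nat) : x >>> k = x.fdiv (2 ^ k) := by
  rw [Int.shiftRight_eq_div_pow, Int.fdiv_eq_ediv]
  have h : (0 : Int) ≤ (2 : Int) ^ k := by positivity
  simp [h]

-- doubling a remainder and reducing again is reducing the double
lemma fmod_mul_two (x b : Int) : (x.fmod b * 2).fmod b = (x * 2).fmod b := by
  have h : x.fmod b = x - b * x.fdiv b := by
    have := PySem.Int.floordiv_mul_add_mod x b
    simp only [PySem.Int.floordiv, PySem.Int.mod] at this
    linarith
  have h2 : (x - b * x.fdiv b) * 2 = x * 2 + b * (-(2 * x.fdiv b)) := by ring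
  rw [h, h2, Int.add_mul_fmod_self_left]

-- THE KEY FACT: bit n of floor(r·2^(m+1+n)/b) is the quotient produced by A's
-- doubling step at the state r·2^m mod b.
lemma bit_eq (b r : Int) (hb : b ≠ 0) (m n : Nat) :
    ((r * 2 ^ (m + 1 + n)).fdiv b >>> n).fmod 2
      = ((r * 2 ^ m).fmod b * 2).fdiv b := by
  have hq : (r * 2 ^ m).fmod b = r * 2 ^ m - b * (r * 2 ^ m).fdiv b := by
    have := PySem.Int.floordiv_mul_add_mod (r * 2 ^ m) b
    simp only [PySem.Int.floordiv, PySem.Int.mod] at this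
    linarith
  -- right-hand side: subtracting b·q before doubling shifts the quotient down by 2q
  have hrhs : ((r * 2 ^ m).fmod b * 2).fdiv b
      = (r * 2 ^ (m + 1)).fdiv b + (-(2 * (r * 2 ^ m).fdiv b)) := by
    have h2 : (r * 2 ^ m - b * (r * 2 ^ m).fdiv b) * 2
        = r * 2 ^ (m + 1) + b * (-(2 * (r * 2 ^ m).fdiv b)) := by ring
    rw [hq, h2, Int.add_mul_fdiv_left _ _ hb]
  -- left-hand side: collapse the shift and the two divisions
  rw [shiftRight_eq_fdiv, fdiv_fdiv_pos _ _ _ (by positivity)]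
  have e1 : r * 2 ^ (m + 1 + n) = (r * 2 ^ (m + 1)) * 2 ^ n := by ring
  rw [e1, Int.mul_fdiv_mul_of_pos_left _ _ (by positivity : (0:Int) < 2 ^ n)]
  have hmod2 : ((r * 2 ^ (m + 1)).fdiv b).fmod 2
      = (r * 2 ^ (m + 1)).fdiv b - 2 * ((r * 2 ^ (m + 1)).fdiv b).fdiv 2 := by
    have := PySem.Int.floordiv_mul_add_mod ((r * 2 ^ (m + 1)).fdiv b) 2
    simp only [PySem.Int.floordiv, PySem.Int.mod] at this
    linarith
  have hdd : ((r * 2 ^ (m + 1)).fdiv b).fdiv 2 = (r * 2 ^ m).fdiv b := by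
    rw [fdiv_fdiv_pos _ _ _ (by norm_num : (0:Int) < 2)]
    have e2 : r * 2 ^ (m + 1) = (r * 2 ^ m) * 2 := by ring
    rw [e2, Int.mul_fdiv_mul_of_pos_left _ _ (by norm_num : (0:Int) < 2)]
  rw [hmod2, hdd, hrhs]
  ring

-- the invariant of A's fractional loop: starting 400-n with state (r·2^(399-n)) mod b,
-- the loop appends exactly B's fractional items
set_option maxRecDepth 8192 in
lemma loop2 (a b : Int) (hb : b ≠ 0) :
    ∀ (n : Nat), n ≤ 399 → ∀ (d : PySem.Dict Int Int),
    (∀ k ∈ d.keys, -(400 - (n : Int)) < k) →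
    ((PySem.List.pyRange (400 - (n : Int)) 400 1).foldl
      (fun (s : PySem.Dict Int Int × Int) i =>
        (s.1.insert (-i) (PySem.Int.floordiv (s.2 * 2) b), PySem.Int.mod (s.2 * 2) b))
      (d, ((a.fmod b) * 2 ^ (399 - n)).fmod b)).1.items
    = d.items ++ (PySem.List.pyRange (400 - (n : Int)) 400 1).map
        (fun i => (-i, PySem.Int.band
          (PySem.Int.floordiv ((PySem.Int.mod a b) <<< (399 : Nat)) b >>> (399 - i).toNat) 1)) := by
  intro n
  induction n with
  | zero =>
    intro _ d _
    rw [PySem.List.pyRange_one_eq_nil (by norm_num)]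
    simp
  | succ n ih =>
    intro hn d hkeys
    have hn' : n ≤ 399 := by omega
    have hcast : ((n + 1 : Nat) : Int) = (n : Int) + 1 := by push_cast; ring
    rw [hcast] at hkeys ⊢
    have h1 : (400 : Int) - ((n : Int) + 1) = 399 - (n : Int) := by ring
    have h2 : (400 : Int) - ((n : Int) + 1) + 1 = 400 - (n : Int) := by ring
    have h3 : (399 : Int) - (n : Int) + 1 = 400 - (n : Int) := by ring
    have hcons : PySem.List.pyRange (400 - ((n : Int) + 1)) 400 1
        = (399 - (n : Int)) :: PySem.List.pyRange (400 - (n : Int)) 400 1 := by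
      rw [h1, PySem.List.pyRange_one_cons (by omega), h3]
    have hexp : 399 - (n + 1) = 398 - n := by omega
    rw [hcons, List.foldl_cons, List.map_cons, hexp]
    simp only []
    have hstate : PySem.Int.mod ((a.fmod b * 2 ^ (398 - n)).fmod b * 2) b
        = (a.fmod b * 2 ^ (399 - n)).fmod b := by
      show ((a.fmod b * 2 ^ (398 - n)).fmod b * 2).fmod b = _
      rw [fmod_mul_two]
      have e : a.fmod b * 2 ^ (398 - n) * 2 = a.fmod b * 2 ^ (398 - n + 1) := by ring
      have e2 : 398 - n + 1 = 399 - n := by omega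
      rw [e, e2]
    have hfresh : d.contains (-(399 - (n : Int))) = false := by
      by_contra h
      have hc : d.contains (-(399 - (n : Int))) = true := by
        cases hcon : d.contains (-(399 - (n : Int))) with
        | true => rfl
        | false => exact absurd hcon h
      have hmem := (PySem.Dict.contains_iff_mem_keys d _).mp hc
      have := hkeys _ hmem
      omega
    have hkeys' : ∀ k ∈ (d.insert (-(399 - (n : Int)))
        (PySem.Int.floordiv ((a.fmod b * 2 ^ (398 - n)).fmod b * 2) b)).keys,
        -(400 - (n : Int)) < k := by
      intro k hk
      rcases (PySem.Dict.mem_keys_insert _ _ _ _).mp hk with h | h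
      · omega
      · have := hkeys k h
        omega
    rw [hstate, ih hn' _ hkeys',
      PySem.Dict.items_insert_of_not_contains _ _ hfresh,
      List.append_assoc, List.singleton_append]
    congr 2
    -- value of the inserted digit = B's bit
    have ht : ((399 : Int) - (399 - (n : Int))).toNat = n := by omega
    rw [ht, Int.shiftRight_natCast_right, PySem.Int.band_one]
    congr 1
    show ((a.fmod b * 2 ^ (398 - n)).fmod b * 2).fdiv b
        = (((a.fmod b <<< (399 : Nat)).fdiv b >>> n)).fmod 2
    rw [Int.shiftLeft_eq]
    have e399 : (398 - n) + 1 + n = 399 := by omega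
    have hbit := bit_eq b (a.fmod b) hb (398 - n) n
    rw [e399] at hbit
    exact hbit.symm

-- the items of A's first loop are B's integer-bit items
lemma loop1 (u : Int) :
    ((PySem.List.pyRange 0 63 1).foldl
      (fun (d : PySem.Dict Int Int) i => d.insert i (PySem.Int.band (u >>> i.toNat) 1))
      PySem.Dict.empty).items
    = (PySem.List.pyRange 0 63 1).map (fun i => (i, PySem.Int.band (u >>> i.toNat) 1)) := by
  have h := PySem.Dict.items_foldl_insert_fresh (PySem.List.pyRange 0 63 1)
    (fun i => i) (fun i => PySem.Int.band (u >>> i.toNat) 1)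
    (PySem.Dict.empty : PySem.Dict Int Int)
    (fun a _ => by simp [PySem.Dict.contains_empty])
    (by simpa using PySem.List.nodup_pyRange_one 0 63)
  rw [h]
  simp [PySem.Dict.empty]
  intro a h0 _
  rw [max_eq_left h0, ← Int.shiftRight_natCast_right, Int.toNat_of_nonneg h0]

-- ===== VERDICT (by name: the statement is the Claim_ definition above) =====
theorem convert_spec : Claim_equal_convert := by
  intro a b _ hb
  show convert a b = convert_alt a b
  unfold convert convert_alt
  simp only []
  -- name A's first-loop dict
  have hinit : PySem.Int.mod a b = ((a.fmod b) * 2 ^ (399 - 399)).fmod b := by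
    show a.fmod b = _
    simp
  rw [hinit]
  have h2 := loop2 a b hb 399 (by norm_num)
    ((PySem.List.pyRange 0 63 1).foldl
      (fun (d : PySem.Dict Int Int) i => d.insert i (PySem.Int.band ((PySem.Int.floordiv a b) >>> i.toNat) 1))
      PySem.Dict.empty)
    (by
      intro k hk
      have : k ∈ ((PySem.List.pyRange 0 63 1).foldl
        (fun (d : PySem.Dict Int Int) i => d.insert i (PySem.Int.band ((PySem.Int.floordiv a b) >>> i.toNat) 1))
        PySem.Dict.empty).items.map (·.1) := hk
      rw [loop1] at this
      simp only [List.map_map] at this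
      rcases List.mem_map.mp this with ⟨i, hi, hik⟩
      have := (PySem.List.mem_pyRange_one).mp hi
      have hk0 : k = i := by simpa using hik.symm
      omega)
  norm_num at h2 ⊢
  rw [h2, loop1]
  simp [PySem.Int.mod]
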